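-- pv_equiv track=rewrite | github.com/sekgobela-kevin/perock | source/perock/forcetable.py | records_to_item_names_map
-- ===== SOURCE A (Python) =====
-- from typing import Any, Callable, Dict, Sequence
-- from typing import Iterable, Iterator, List, Set
--
-- class Record(dict):
--     '''Class for operating with record data. Row data represents
--     records to be sent to target, e.g 'password' and 'username'.'''
--     def __init__(self, items={}) -> None:
--         '''
--         Creates Record object from dictionary
--         Parameters
--         ----------
--         items: Dict
--             (optional) Dictionary/map with record items
--         '''
--         super().__init__(items)
--
--     def add_item(self, name, value):
--         '''Adds item to record'''
--         self[name] = value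
--
--     def add_items(self, items):
--         '''Adds items to record'''
--         self.update(items)
--
--     def set_items(self, items):
--         '''Sets/overides record items with specified items'''
--         self.clear()
--         self.update(items)
--
--     def get_item(self, name):
--         return self.get(name)
--
--     def get_items(self):
--         return dict(self)
--
-- def records_to_item_names_map(
--     records: Iterator[Record],
--     unique=False):
--     # Returns dictionary with item names and iterators
--     item_names_map: Dict[str, List] = {}
--     for record in records:
--         for name, value in record.items():
--             item_names_map[name] = item_names_map.get(name, [])
--             if unique and value in item_names_map[name]:
--                 continue
--             item_names_map[name].append(value)
--     # Dict["item names": "Iterator"]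
--     return item_names_map
-- ===== SOURCE B (Python) =====
-- def records_to_item_names_map(records, unique=False):
--     # Phase 1: plain grouping pass (no unique check).
--     item_names_map = {}
--     for record in records:
--         for name, value in record.items():
--             item_names_map.setdefault(name, []).append(value)
--     # Phase 2: if requested, replace each list with an order-preserving dedup.
--     if unique:
--         for name, values in item_names_map.items():
--             deduped = []
--             for v in values:
--                 if v not in deduped:
--                     deduped.append(v)
--             item_names_map[name] = deduped
--     return item_names_map
-- ===== Notes on version B (the rewrite author's own statement) =====
-- stated objective: alternative
-- what changed: Replaces A's single pass that interleaves grouping with an on-the-fly membership check per value by two separate phases: an unconditional grouping pass, then (only when unique) an order-preserving dedup pass over each grouped list.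
import Mathlib
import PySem

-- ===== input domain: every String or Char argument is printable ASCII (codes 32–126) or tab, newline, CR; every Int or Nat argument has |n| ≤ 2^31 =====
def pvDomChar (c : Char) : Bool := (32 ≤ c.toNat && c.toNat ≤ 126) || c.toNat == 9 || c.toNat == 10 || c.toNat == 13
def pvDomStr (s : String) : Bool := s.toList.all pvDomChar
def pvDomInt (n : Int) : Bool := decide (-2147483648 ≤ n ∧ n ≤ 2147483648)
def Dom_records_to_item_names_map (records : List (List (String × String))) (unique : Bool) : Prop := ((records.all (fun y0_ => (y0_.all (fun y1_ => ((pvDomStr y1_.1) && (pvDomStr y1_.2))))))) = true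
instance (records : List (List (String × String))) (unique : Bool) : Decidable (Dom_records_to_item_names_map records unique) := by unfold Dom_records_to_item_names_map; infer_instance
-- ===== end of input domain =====

-- B replaces A's single pass (grouping interleaved with a per-value membership check) by two
-- phases: an unconditional grouping pass, then a dedup pass per key when unique; same results.

-- ===== PORT A =====
def records_to_item_names_map (records : List (List (String × String))) (unique : Bool) : List (String × List String) :=
  (records.foldl (fun item_names_map record =>
      record.foldl (fun item_names_map p =>
        -- item_names_map[name] = item_names_map.get(name, [])
        let m := item_names_map.insert p.1 (item_names_map.getD p.1 ([] : List String))
        -- if unique and value in item_names_map[name]: continue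
        if unique && (m.getD p.1 []).contains p.2 then m
        -- item_names_map[name].append(value)
        else m.insert p.1 (m.getD p.1 [] ++ [p.2])) item_names_map)
    PySem.Dict.empty).items

-- ===== PORT B =====
-- order-preserving dedup loop of Source B ('if v not in deduped: deduped.append(v)' = PySem.Set.add)
def pvDedup (values : List String) : List String :=
  values.foldl (fun deduped v => PySem.Set.add deduped v) PySem.Set.empty

def records_to_item_names_map_alt (records : List (List (String × String))) (unique : Bool) : List (String × List String) :=
  -- Phase 1: item_names_map.setdefault(name, []).append(value)
  let item_names_map := records.foldl (fun m record =>
      record.foldl (fun m p => m.insert p.1 (m.getD p.1 ([] : List String) ++ [p.2])) m)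
    PySem.Dict.empty
  -- Phase 2: replace each value list with its deduplicated copy when unique
  if unique then item_names_map.items.map (fun p => (p.1, pvDedup p.2))
  else item_names_map.items

-- ===== PRECONDITION & SPEC =====
def Spec_records_to_item_names_map (records : List (List (String × String))) (unique : Bool) (out : List (String × List String)) : Prop := out = records_to_item_names_map_alt records unique
instance (records : List (List (String × String))) (unique : Bool) (out : List (String × List String)) : Decidable (Spec_records_to_item_names_map records unique out) := by unfold Spec_records_to_item_names_map; infer_instance

-- ===== CLAIM (what is proved, stated in full; the proofs are below) =====
def Claim_equal_records_to_item_names_map : Prop := ∀ (records : List (List (String × String))) (unique : Bool), Dom_records_to_item_names_map records unique → Spec_records_to_item_names_map records unique (records_to_item_names_map records unique)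

-- ===== LEMMAS AND PROOFS =====

-- value-side transform relating A's dict (unique = true) to B's grouped dict
def pvF : (String × List String) → (String × List String) := fun p => (p.1, PySem.Set.ofList p.2)

lemma pvDedup_eq_ofList (values : List String) : pvDedup values = PySem.Set.ofList values := by
  rw [pvDedup, PySem.Set.ofList_eq_foldl]; rfl

lemma pvInsertInsert (d : PySem.Dict String (List String)) (k : String) (a b : List String) :
    (d.insert k a).insert k b = d.insert k b := by
  apply PySem.Dict.ext
  rw [PySem.Dict.items_insert, PySem.Dict.items_insert, PySem.Dict.items_insert,
      PySem.Dict.contains_insert_self]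
  by_cases h : d.contains k = true
  · simp only [h, if_true, List.map_map]
    apply List.map_congr_left
    intro p _
    by_cases hp : (p.1 == k) = true <;> simp [hp, Function.comp]
  · simp only [h, Bool.false_eq_true, if_false, if_true, List.map_append, List.map_cons,
      List.map_nil]
    rw [if_pos (by simp)]
    congr 1
    conv_rhs => rw [← List.map_id d.items]
    apply List.map_congr_left
    intro p hp
    have hk : (p.1 == k) = false := by
      rw [beq_eq_false_iff_ne]
      intro he
      apply h
      obtain ⟨l⟩ := d
      rw [PySem.Dict.contains_mk]
      exact List.any_eq_true.mpr ⟨p, hp, by simp [he]⟩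
    simp [hk]

lemma pvContainsMap (l : List (String × List String)) (k : String) :
    (PySem.Dict.mk (l.map pvF)).contains k = (PySem.Dict.mk l).contains k := by
  simp [PySem.Dict.contains_mk, List.any_map, Function.comp_def, pvF]

lemma pvGetMap (l : List (String × List String)) (k : String) :
    (PySem.Dict.mk (l.map pvF)).get? k = ((PySem.Dict.mk l).get? k).map PySem.Set.ofList := by
  induction l with
  | nil => rfl
  | cons hd tl ih =>
    rw [List.map_cons]
    show (PySem.Dict.mk ((hd.1, PySem.Set.ofList hd.2) :: tl.map pvF)).get? k = _
    rw [PySem.Dict.get?_mk_cons, PySem.Dict.get?_mk_cons]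
    by_cases hk : (hd.1 == k) = true <;> simp [hk, ih]

lemma pvGetDMap (l : List (String × List String)) (k : String) :
    (PySem.Dict.mk (l.map pvF)).getD k [] = PySem.Set.ofList ((PySem.Dict.mk l).getD k []) := by
  rw [PySem.Dict.getD_eq_get?_getD, PySem.Dict.getD_eq_get?_getD, pvGetMap]
  cases (PySem.Dict.mk l).get? k <;> rfl

lemma pvInsertMap (l : List (String × List String)) (k : String) (w : List String) :
    ((PySem.Dict.mk (l.map pvF)).insert k (PySem.Set.ofList w)).items
      = ((PySem.Dict.mk l).insert k w).items.map pvF := by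
  rw [PySem.Dict.items_insert, PySem.Dict.items_insert, pvContainsMap]
  by_cases h : (PySem.Dict.mk l).contains k = true
  · simp only [h, if_true]
    show (l.map pvF).map _ = (l.map _).map pvF
    rw [List.map_map, List.map_map]
    apply List.map_congr_left
    intro p _
    by_cases hp : (p.1 == k) = true <;> simp [hp, pvF, Function.comp]
  · simp only [h, Bool.false_eq_true, if_false]
    show l.map pvF ++ [(k, PySem.Set.ofList w)] = (l ++ [(k, w)]).map pvF
    simp [pvF]

-- one A-step (unique = true) equals insert of 'Set.add' of the current deduped list
lemma pvStepTrue (dB : PySem.Dict String (List String)) (p : String × String) :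
    ((fun (m : PySem.Dict String (List String)) (p : String × String) =>
        let m := m.insert p.1 (m.getD p.1 ([] : List String))
        if true && (m.getD p.1 []).contains p.2 then m
        else m.insert p.1 (m.getD p.1 [] ++ [p.2]))
      (PySem.Dict.mk (dB.items.map pvF)) p).items
    = ((dB.insert p.1 (dB.getD p.1 [] ++ [p.2])).items).map pvF := by
  set dA := PySem.Dict.mk (dB.items.map pvF) with hdA
  have hs : dA.getD p.1 [] = PySem.Set.ofList (dB.getD p.1 []) := by
    rw [hdA]
    exact pvGetDMap dB.items p.1
  have hcur : (dA.insert p.1 (dA.getD p.1 [])).getD p.1 [] = dA.getD p.1 [] :=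
    PySem.Dict.getD_insert_self _ _ _ _
  show (if (true && ((dA.insert p.1 (dA.getD p.1 [])).getD p.1 []).contains p.2) = true
        then dA.insert p.1 (dA.getD p.1 [])
        else (dA.insert p.1 (dA.getD p.1 [])).insert p.1
              ((dA.insert p.1 (dA.getD p.1 [])).getD p.1 [] ++ [p.2])).items = _
  rw [hcur, pvInsertInsert]
  simp only [Bool.true_and]
  by_cases hc : (dA.getD p.1 []).contains p.2 = true
  · rw [if_pos hc]
    have hmem : p.2 ∈ PySem.Set.ofList (dB.getD p.1 []) := by
      rw [hs] at hc; simpa using hc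
    have heq : dA.getD p.1 [] = PySem.Set.ofList (dB.getD p.1 [] ++ [p.2]) := by
      rw [hs, PySem.Set.ofList_append_singleton, PySem.Set.add_of_mem hmem]
    rw [heq, hdA]
    exact pvInsertMap dB.items p.1 _
  · rw [if_neg hc]
    have hmem : p.2 ∉ PySem.Set.ofList (dB.getD p.1 []) := by
      intro hm
      rw [hs] at hc
      exact hc (by simpa using hm)
    have heq : dA.getD p.1 [] ++ [p.2] = PySem.Set.ofList (dB.getD p.1 [] ++ [p.2]) := by
      rw [hs, PySem.Set.ofList_append_singleton, PySem.Set.add_of_not_mem hmem]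
    rw [heq, hdA]
    exact pvInsertMap dB.items p.1 _

lemma pvLoopTrue (l : List (String × String)) :
    ∀ (dA dB : PySem.Dict String (List String)), dA.items = dB.items.map pvF →
    (l.foldl (fun (m : PySem.Dict String (List String)) (p : String × String) =>
        let m := m.insert p.1 (m.getD p.1 ([] : List String))
        if true && (m.getD p.1 []).contains p.2 then m
        else m.insert p.1 (m.getD p.1 [] ++ [p.2])) dA).items
    = ((l.foldl (fun m p => m.insert p.1 (m.getD p.1 ([] : List String) ++ [p.2])) dB).items).map pvF := by
  induction l with
  | nil => intro dA dB h; simpa using h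
  | cons hd tl ih =>
    intro dA dB h
    rw [List.foldl_cons, List.foldl_cons]
    apply ih
    have hda : dA = PySem.Dict.mk (dB.items.map pvF) := PySem.Dict.ext h
    rw [hda]
    exact pvStepTrue dB hd

lemma pvRecordsTrue (records : List (List (String × String))) :
    ∀ (dA dB : PySem.Dict String (List String)), dA.items = dB.items.map pvF →
    (records.foldl (fun d record =>
        record.foldl (fun (m : PySem.Dict String (List String)) (p : String × String) =>
          let m := m.insert p.1 (m.getD p.1 ([] : List String))
          if true && (m.getD p.1 []).contains p.2 then m
          else m.insert p.1 (m.getD p.1 [] ++ [p.2])) d) dA).items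
    = ((records.foldl (fun d record =>
        record.foldl (fun m p => m.insert p.1 (m.getD p.1 ([] : List String) ++ [p.2])) d) dB).items).map pvF := by
  induction records with
  | nil => intro dA dB h; simpa using h
  | cons hd tl ih =>
    intro dA dB h
    rw [List.foldl_cons, List.foldl_cons]
    apply ih
    exact pvLoopTrue hd dA dB h

lemma pvStepFalse :
    (fun (m : PySem.Dict String (List String)) (p : String × String) =>
        let m := m.insert p.1 (m.getD p.1 ([] : List String))
        if false && (m.getD p.1 []).contains p.2 then m
        else m.insert p.1 (m.getD p.1 [] ++ [p.2]))
    = (fun (m : PySem.Dict String (List String)) (p : String × String) =>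
        m.insert p.1 (m.getD p.1 ([] : List String) ++ [p.2])) := by
  funext m p
  simp only [Bool.false_and, Bool.false_eq_true, if_false]
  rw [PySem.Dict.getD_insert_self, pvInsertInsert]

-- ===== VERDICT (by name: the statement is the Claim_ definition above) =====
theorem records_to_item_names_map_spec : Claim_equal_records_to_item_names_map := by
  intro records unique _
  unfold Spec_records_to_item_names_map records_to_item_names_map records_to_item_names_map_alt
  cases unique
  · simp only [if_neg (by simp : ¬ (false = true))]
    rw [pvStepFalse]
  · have h := pvRecordsTrue records PySem.Dict.empty PySem.Dict.empty (by rfl)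
    rw [h]
    apply List.map_congr_left
    intro p _
    simp [pvF, pvDedup_eq_ofList]
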